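-- pv_equiv track=rewrite | github.com/jilong1986/firstcommit | ComputeCosineSimilarity.py | NewInfoMatchKeyword
-- ===== SOURCE A (Python) =====
-- def NewInfoMatchKeyword(NewInfo,KeyWord):
--     KeyFlag = ""
--     i = 0
--     while i < len(KeyWord):
--         if KeyWord[i] in NewInfo:
--             KeyFlag += "1"
--         else:
--             KeyFlag += "0"
--         i += 1
--
--     return KeyFlag
-- ===== SOURCE B (Python) =====
-- def NewInfoMatchKeyword(NewInfo, KeyWord):
--     # Inverted index: keyword -> list of its positions in KeyWord.
--     positions = {}
--     for idx, k in enumerate(KeyWord):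
--         positions.setdefault(k, []).append(idx)
--     flags = ["0"] * len(KeyWord)
--     # Single scan of NewInfo flips the flags of every keyword seen.
--     for item in NewInfo:
--         for idx in positions.get(item, ()):
--             flags[idx] = "1"
--     return "".join(flags)
-- ===== Notes on version B (the rewrite author's own statement) =====
-- stated objective: faster
-- what changed: Inverts the data flow: instead of scanning NewInfo once per keyword with quadratic string concatenation, B builds an inverted index keyword->positions, pre-fills a '0' flag array, and a single pass over NewInfo sets the positions of each item it finds, then joins.
import Mathlib
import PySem

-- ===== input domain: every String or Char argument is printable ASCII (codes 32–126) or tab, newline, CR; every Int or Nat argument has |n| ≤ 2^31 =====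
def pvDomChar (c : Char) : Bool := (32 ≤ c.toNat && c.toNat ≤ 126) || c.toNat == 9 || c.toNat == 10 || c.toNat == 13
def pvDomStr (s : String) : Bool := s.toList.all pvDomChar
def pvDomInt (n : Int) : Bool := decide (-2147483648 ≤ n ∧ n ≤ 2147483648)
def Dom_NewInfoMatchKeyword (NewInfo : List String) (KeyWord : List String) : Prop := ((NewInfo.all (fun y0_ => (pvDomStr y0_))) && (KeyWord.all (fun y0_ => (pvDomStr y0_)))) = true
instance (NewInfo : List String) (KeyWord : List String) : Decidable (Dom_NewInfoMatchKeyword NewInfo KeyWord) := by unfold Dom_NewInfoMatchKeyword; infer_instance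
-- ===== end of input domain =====

-- B inverts the data flow: an inverted index keyword->positions plus one scan of NewInfo setting flags, instead of A's per-keyword membership scan with string concatenation (faster).

-- ===== PORT A =====
-- A: while loop over index i, appending "1"/"0" to KeyFlag
def NewInfoMatchKeywordLoop (NewInfo : List String) (KeyWord : List String) (KeyFlag : String) (i : Nat) : String :=
  if h : i < KeyWord.length then
    NewInfoMatchKeywordLoop NewInfo KeyWord
      (KeyFlag ++ (if KeyWord[i] ∈ NewInfo then "1" else "0")) (i + 1)
  else
    KeyFlag
termination_by KeyWord.length - i

def NewInfoMatchKeyword (NewInfo : List String) (KeyWord : List String) : String :=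
  NewInfoMatchKeywordLoop NewInfo KeyWord "" 0

-- ===== PORT B =====
-- positions = {}; for idx, k in enumerate(KeyWord): positions.setdefault(k, []).append(idx)
def pvPositions (KeyWord : List String) : PySem.Dict String (List Int) :=
  (PySem.List.enumerate KeyWord 0).foldl
    (fun d p => PySem.Dict.modify d p.2 [] (fun l => l ++ [p.1])) PySem.Dict.empty

-- for item in NewInfo: for idx in positions.get(item, ()): flags[idx] = "1"
def pvMark (positions : PySem.Dict String (List Int)) (flags : List String) (NewInfo : List String) : List String :=
  NewInfo.foldl
    (fun fl item => (PySem.Dict.getD positions item []).foldl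
        (fun fl idx => PySem.List.pySetD fl idx "1") fl) flags

def NewInfoMatchKeyword_alt (NewInfo : List String) (KeyWord : List String) : String :=
  String.join (pvMark (pvPositions KeyWord) (List.replicate KeyWord.length "0") NewInfo)

-- ===== PRECONDITION & SPEC =====
def Spec_NewInfoMatchKeyword (NewInfo : List String) (KeyWord : List String) (out : String) : Prop := out = NewInfoMatchKeyword_alt NewInfo KeyWord
instance (NewInfo : List String) (KeyWord : List String) (out : String) : Decidable (Spec_NewInfoMatchKeyword NewInfo KeyWord out) := by unfold Spec_NewInfoMatchKeyword; infer_instance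

-- ===== CLAIM (what is proved, stated in full; the proofs are below) =====
def Claim_equal_NewInfoMatchKeyword : Prop := ∀ (NewInfo : List String) (KeyWord : List String), Dom_NewInfoMatchKeyword NewInfo KeyWord → Spec_NewInfoMatchKeyword NewInfo KeyWord (NewInfoMatchKeyword NewInfo KeyWord)

-- ===== LEMMAS AND PROOFS =====

theorem join_foldl (l : List String) (a : String) :
    List.foldl (fun r s => r ++ s) a l = a ++ String.join l := by
  induction l generalizing a with
  | nil => simp [String.join]
  | cons x xs ih => simp [String.join, List.foldl, ih (a ++ x), ih x, String.append_assoc]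

theorem join_cons (a : String) (l : List String) :
    String.join (a :: l) = a ++ String.join l := by
  show List.foldl (fun r s => r ++ s) "" (a :: l) = _
  rw [List.foldl_cons, join_foldl]
  simp

theorem loop_spec (NewInfo KeyWord : List String) (n : Nat) :
    ∀ (i : Nat) (KeyFlag : String), KeyWord.length - i ≤ n →
    NewInfoMatchKeywordLoop NewInfo KeyWord KeyFlag i
      = KeyFlag ++ String.join ((KeyWord.drop i).map
          (fun k => if k ∈ NewInfo then "1" else "0")) := by
  induction n with
  | zero =>
    intro i KeyFlag hn
    rw [NewInfoMatchKeywordLoop]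
    have h : ¬ i < KeyWord.length := by omega
    simp [h, List.drop_of_length_le (by omega : KeyWord.length ≤ i), String.join]
  | succ n ih =>
    intro i KeyFlag hn
    rw [NewInfoMatchKeywordLoop]
    by_cases h : i < KeyWord.length
    · have hi : KeyWord.drop i = KeyWord[i] :: KeyWord.drop (i + 1) :=
        (List.drop_eq_getElem_cons h)
      simp only [h, dif_pos]
      rw [ih (i + 1) _ (by omega), hi]
      rw [List.map_cons, join_cons, String.append_assoc]
    · simp [h, List.drop_of_length_le (by omega : KeyWord.length ≤ i), String.join]

-- characterize the inverted index: (i : Int) is listed under k iff K has k at position i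
theorem mem_positions (KeyWord : List String) (k : String) (i : Int) :
    i ∈ PySem.Dict.getD (pvPositions KeyWord) k [] ↔
      ∃ (j : Nat) (h : j < KeyWord.length), i = (j : Int) ∧ KeyWord[j] = k := by
  unfold pvPositions
  have hfold :
      (PySem.List.enumerate KeyWord 0).foldl
        (fun (d : PySem.Dict String (List Int)) p =>
          PySem.Dict.modify d p.2 [] (fun l => l ++ [p.1])) PySem.Dict.empty
      = ((PySem.List.enumerate KeyWord 0).map (fun p => (p.2, p.1))).foldl
        (fun (d : PySem.Dict String (List Int)) q =>
          PySem.Dict.modify d q.1 [] (fun l => l ++ [q.2])) PySem.Dict.empty := by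
    rw [List.foldl_map]
  rw [hfold, PySem.Dict.getD_foldl_modify_append]
  simp only [PySem.Dict.getD_empty, List.nil_append, List.filter_map, List.map_map,
    List.mem_map, List.mem_filter, Function.comp, PySem.List.mem_enumerate_iff,
    beq_iff_eq]
  constructor
  · rintro ⟨p, ⟨⟨⟨j, hj, rfl⟩, hk⟩, rfl⟩⟩
    exact ⟨j, hj, by simp, by simpa using hk⟩
  · rintro ⟨j, hj, rfl, rfl⟩
    exact ⟨((j : Int), KeyWord[j]), ⟨⟨j, hj, by simp⟩, by simp⟩, by simp⟩

theorem length_setfold (idxs : List Int) (fl : List String) :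
    (idxs.foldl (fun fl idx => PySem.List.pySetD fl idx "1") fl).length = fl.length := by
  induction idxs generalizing fl with
  | nil => rfl
  | cons x xs ih => simp [List.foldl_cons, ih, PySem.List.length_pySetD]

theorem setfold_getElem? (idxs : List Int) (fl : List String) (i : Nat)
    (hnn : ∀ x ∈ idxs, 0 ≤ x) :
    (idxs.foldl (fun fl idx => PySem.List.pySetD fl idx "1") fl)[i]? =
      if (i : Int) ∈ idxs ∧ i < fl.length then some "1" else fl[i]? := by
  induction idxs generalizing fl with
  | nil => simp
  | cons x xs ih =>
    have hx : 0 ≤ x := hnn x (List.mem_cons_self ..)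
    simp only [List.foldl_cons]
    rw [ih _ (fun y hy => hnn y (List.mem_cons_of_mem _ hy))]
    rw [PySem.List.pySetD_of_nonneg (h := hx)]
    have hxi : ((i : Int) = x) ↔ (i = x.toNat) := by omega
    by_cases h1 : (i : Int) ∈ xs ∧ i < fl.length
    · rw [if_pos (by simpa [List.length_set] using h1),
        if_pos ⟨List.mem_cons_of_mem _ h1.1, h1.2⟩]
    · rw [if_neg (by simpa [List.length_set] using h1)]
      by_cases h2 : i = x.toNat ∧ i < fl.length
      · rw [if_pos ⟨List.mem_cons.mpr (Or.inl (by omega)), h2.2⟩, h2.1,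
          List.getElem?_set_self (by omega)]
      · rw [if_neg (by
            rintro ⟨hm, hl⟩
            rcases List.mem_cons.mp hm with h | h
            · exact h2 ⟨hxi.mp h, hl⟩
            · exact h1 ⟨h, hl⟩)]
        by_cases hl : i < fl.length
        · rw [List.getElem?_set_ne (by omega)]
        · rw [List.getElem?_eq_none (by simpa [List.length_set] using hl),
            List.getElem?_eq_none (by omega)]

theorem mark_getElem? (NewInfo KeyWord : List String) (fl : List String) (i : Nat)
    (hlen : fl.length = KeyWord.length) :
    (pvMark (pvPositions KeyWord) fl NewInfo)[i]? =
      if (∃ h : i < KeyWord.length, KeyWord[i] ∈ NewInfo) then some "1" else fl[i]? := by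
  induction NewInfo generalizing fl with
  | nil =>
    rw [if_neg]
    · rfl
    · rintro ⟨h, hm⟩; exact (List.not_mem_nil hm)
  | cons item rest ih =>
    unfold pvMark
    rw [List.foldl_cons]
    have hnn : ∀ x ∈ PySem.Dict.getD (pvPositions KeyWord) item [], 0 ≤ x := by
      intro x hx
      obtain ⟨j, hj, rfl, -⟩ := (mem_positions KeyWord item x).mp hx
      positivity
    have hlen' :
        ((PySem.Dict.getD (pvPositions KeyWord) item []).foldl
          (fun fl idx => PySem.List.pySetD fl idx "1") fl).length = KeyWord.length := by
      rw [length_setfold, hlen]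
    rw [show rest.foldl (fun fl item => (PySem.Dict.getD (pvPositions KeyWord) item []).foldl
        (fun fl idx => PySem.List.pySetD fl idx "1") fl) _
      = pvMark (pvPositions KeyWord) _ rest from rfl, ih _ hlen',
      setfold_getElem? _ _ _ hnn]
    have hcond : ((i : Int) ∈ PySem.Dict.getD (pvPositions KeyWord) item [] ∧ i < fl.length)
        ↔ (∃ h : i < KeyWord.length, KeyWord[i] = item) := by
      rw [mem_positions]
      constructor
      · rintro ⟨⟨j, hj, hij, hk⟩, -⟩
        have : i = j := by omega
        subst this; exact ⟨hj, hk⟩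
      · rintro ⟨h, hk⟩
        exact ⟨⟨i, h, rfl, hk⟩, by omega⟩
    by_cases hrest : ∃ h : i < KeyWord.length, KeyWord[i] ∈ rest
    · obtain ⟨h, hm⟩ := hrest
      rw [if_pos ⟨h, hm⟩, if_pos ⟨h, List.mem_cons_of_mem _ hm⟩]
    · rw [if_neg hrest]
      by_cases hhead : ∃ h : i < KeyWord.length, KeyWord[i] = item
      · obtain ⟨h, hk⟩ := hhead
        rw [if_pos (hcond.mpr ⟨h, hk⟩), if_pos ⟨h, by simp [hk]⟩]
      · rw [if_neg (fun hc => hhead (hcond.mp hc)), if_neg (by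
          rintro ⟨h, hm⟩
          rcases List.mem_cons.mp hm with hk | hk
          · exact hhead ⟨h, hk⟩
          · exact hrest ⟨h, hk⟩)]

theorem mark_eq_map (NewInfo KeyWord : List String) :
    pvMark (pvPositions KeyWord) (List.replicate KeyWord.length "0") NewInfo
      = KeyWord.map (fun k => if k ∈ NewInfo then "1" else "0") := by
  apply List.ext_getElem?
  intro i
  rw [mark_getElem? _ _ _ _ (List.length_replicate ..)]
  by_cases h : i < KeyWord.length
  · by_cases hm : KeyWord[i] ∈ NewInfo
    · rw [if_pos ⟨h, hm⟩]
      simp [List.getElem?_eq_getElem h, hm]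
    · rw [if_neg (by rintro ⟨h', hm'⟩; exact hm hm')]
      simp [hm, h]
  · have hge : KeyWord.length ≤ i := by omega
    rw [if_neg (by rintro ⟨h', -⟩; exact h h'),
      List.getElem?_eq_none (by simpa using hge),
      List.getElem?_eq_none (by simpa using hge)]

-- ===== VERDICT (by name: the statement is the Claim_ definition above) =====
theorem NewInfoMatchKeyword_spec : Claim_equal_NewInfoMatchKeyword := by
  intro NewInfo KeyWord _
  unfold Spec_NewInfoMatchKeyword NewInfoMatchKeyword NewInfoMatchKeyword_alt
  rw [loop_spec NewInfo KeyWord KeyWord.length 0 "" (by omega), mark_eq_map]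
  simp
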